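-- pv_equiv track=rewrite | github.com/scholl-lab/variantcentrifuge | variantcentrifuge/stages/stage_registry.py | _find_stages_from
-- ===== SOURCE A (Python) =====
-- def _find_stages_from(
--     start_stage: str, dependency_graph: dict[str, set[str]]
-- ) -> set[str]:
--     """Find all stages that should execute from a given start stage.
--
--     Parameters
--     ----------
--     start_stage : str
--         Starting stage name
--     dependency_graph : Dict[str, Set[str]]
--         Stage dependency graph
--
--     Returns
--     -------
--     Set[str]
--         Set of stage names that should execute
--     """
--     stages_to_execute = {start_stage}
--
--     # Find all stages that depend on stages in our execution set
--     changed = True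
--     while changed:
--         changed = False
--         for stage_name, deps in dependency_graph.items():
--             if stage_name not in stages_to_execute and deps & stages_to_execute:
--                 # If any dependency is in our execution set, this stage should execute too
--                 stages_to_execute.add(stage_name)
--                 changed = True
--
--     return stages_to_execute
-- ===== SOURCE B (Python) =====
-- def _find_stages_from(start_stage, dependency_graph):
--     """BFS over the reverse dependency graph: build a dep -> dependents index
--     once, then explore outward from start_stage."""
--     edges = [(dep, name) for name, deps in dependency_graph.items() for dep in deps]
--     rev = {}
--     for dep, name in edges:
--         rev.setdefault(dep, []).append(name)
--     visited = {start_stage}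
--     queue = [start_stage]
--     i = 0
--     while i < len(queue):
--         cur = queue[i]
--         i += 1
--         for nxt in rev.get(cur, []):
--             if nxt not in visited:
--                 visited.add(nxt)
--                 queue.append(nxt)
--     return visited
-- ===== Notes on version B (the rewrite author's own statement) =====
-- stated objective: alternative
-- what changed: A repeats full passes over the whole dependency graph until a fixed point; B builds the reverse dependency adjacency (dep -> dependents) once and does a single BFS from start_stage (same result, different algorithm; not measurably faster on the timing inputs).
import Mathlib
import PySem

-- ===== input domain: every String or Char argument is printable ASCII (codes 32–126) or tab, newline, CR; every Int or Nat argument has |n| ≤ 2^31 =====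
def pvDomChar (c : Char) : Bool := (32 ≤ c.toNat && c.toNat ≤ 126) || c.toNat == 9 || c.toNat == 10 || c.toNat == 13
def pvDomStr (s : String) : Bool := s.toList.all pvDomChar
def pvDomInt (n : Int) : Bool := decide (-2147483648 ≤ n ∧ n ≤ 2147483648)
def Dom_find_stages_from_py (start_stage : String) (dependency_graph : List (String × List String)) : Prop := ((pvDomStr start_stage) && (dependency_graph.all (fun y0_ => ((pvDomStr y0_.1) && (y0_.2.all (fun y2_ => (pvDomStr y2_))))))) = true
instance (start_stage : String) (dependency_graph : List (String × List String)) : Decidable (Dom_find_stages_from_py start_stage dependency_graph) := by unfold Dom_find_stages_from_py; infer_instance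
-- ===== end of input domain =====

-- B replaces A's repeated whole-graph fixed-point passes by one reverse-adjacency index plus a
-- single BFS from start_stage (objective: alternative algorithm).  The Python function returns a SET of names;
-- per the type convention the Lean ports return its distinct elements as a list and, since a Python
-- set carries no order, both ports return that set in sorted order as its canonical list form.

-- ===== PORT A =====
-- one item of the inner 'for stage_name, deps in dependency_graph.items()' pass;
-- accumulator = (stages_to_execute, changed)
def stepA (acc : PySem.Set String × Bool) (p : String × List String) : PySem.Set String × Bool :=
  if !(PySem.Set.contains acc.1 p.1) && !(PySem.Set.inter (PySem.Set.ofList p.2) acc.1).isEmpty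
  then (PySem.Set.add acc.1 p.1, true)
  else acc

-- the 'while changed:' loop; the fuel 'n' is an upper bound on the number of passes: every pass
-- that reports changed=True adds at least one graph key to the set, so length g + 1 passes suffice
def loopA (g : List (String × List String)) : Nat → PySem.Set String → PySem.Set String
  | 0, s => s
  | n + 1, s =>
      let pr := g.foldl stepA (s, false)
      if pr.2 then loopA g n pr.1 else pr.1

def find_stages_from_py (start_stage : String) (dependency_graph : List (String × List String)) : List String :=
  PySem.List.sorted
    (loopA dependency_graph (dependency_graph.length + 1) (PySem.Set.add PySem.Set.empty start_stage))
    (fun x => x) false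

-- ===== PORT B =====
-- edges = [(dep, name) for name, deps in dependency_graph.items() for dep in deps]
def revEdges (g : List (String × List String)) : List (String × String) :=
  g.flatMap (fun p => (PySem.Set.ofList p.2).map (fun d => (d, p.1)))

-- rev = {}; for dep, name in edges: rev.setdefault(dep, []).append(name)
def revDict (g : List (String × List String)) : PySem.Dict String (List String) :=
  (revEdges g).foldl (fun d p => d.modify p.1 [] (· ++ [p.2])) PySem.Dict.empty

-- the BFS loop; state = (remaining queue, visited); the fuel 'n' bounds the number of pops:
-- every element is enqueued at most once (only when newly visited) and all enqueued elements
-- after the start are graph keys, so length g + 1 pops suffice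
def bfsB (rev : PySem.Dict String (List String)) : Nat → List String → PySem.Set String → PySem.Set String
  | 0, _, v => v
  | _ + 1, [], v => v
  | n + 1, cur :: rest, v =>
      let st := (rev.getD cur []).foldl
        (fun (acc : PySem.Set String × List String) nxt =>
          if PySem.Set.contains acc.1 nxt then acc else (PySem.Set.add acc.1 nxt, acc.2 ++ [nxt]))
        (v, rest)
      bfsB rev n st.2 st.1

def find_stages_from_py_alt (start_stage : String) (dependency_graph : List (String × List String)) : List String :=
  PySem.List.sorted
    (bfsB (revDict dependency_graph) (dependency_graph.length + 1)
      [start_stage] (PySem.Set.add PySem.Set.empty start_stage))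
    (fun x => x) false

-- ===== PRECONDITION & SPEC =====
-- A is total: no Pre_ needed.
def Spec_find_stages_from_py (start_stage : String) (dependency_graph : List (String × List String)) (out : List String) : Prop := out = find_stages_from_py_alt start_stage dependency_graph
instance (start_stage : String) (dependency_graph : List (String × List String)) (out : List String) : Decidable (Spec_find_stages_from_py start_stage dependency_graph out) := by unfold Spec_find_stages_from_py; infer_instance

-- ===== CLAIM (what is proved, stated in full; the proofs are below) =====
def Claim_equal_find_stages_from_py : Prop := ∀ (start_stage : String) (dependency_graph : List (String × List String)), Dom_find_stages_from_py start_stage dependency_graph → Spec_find_stages_from_py start_stage dependency_graph (find_stages_from_py start_stage dependency_graph)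

-- ===== LEMMAS AND PROOFS =====

-- x is reachable from start by following dependency edges backwards (x should execute)
inductive Reach (g : List (String × List String)) (start : String) : String → Prop
  | refl : Reach g start start
  | step (p : String × List String) (d : String) :
      p ∈ g → d ∈ p.2 → Reach g start d → Reach g start p.1

-- the universe of names a run can ever touch
def univ (g : List (String × List String)) (start : String) : List String :=
  PySem.Set.ofList (start :: g.map Prod.fst)

theorem univ_nodup (g : List (String × List String)) (start : String) : (univ g start).Nodup :=
  PySem.Set.nodup_ofList _

theorem length_le_univ {g : List (String × List String)} {start : String} {s : List String}
    (hnd : s.Nodup) (hsub : ∀ x ∈ s, x ∈ univ g start) : s.length ≤ (univ g start).length :=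
  calc s.length = s.toFinset.card := (List.toFinset_card_of_nodup hnd).symm
    _ ≤ (univ g start).toFinset.card := Finset.card_le_card (fun x hx => by
        simpa using hsub x (by simpa using hx))
    _ ≤ (univ g start).length := (univ g start).toFinset_card_le

theorem mem_of_full {g : List (String × List String)} {start : String} {s : List String}
    (hnd : s.Nodup) (hsub : ∀ x ∈ s, x ∈ univ g start)
    (hlen : (univ g start).length ≤ s.length) : ∀ x ∈ univ g start, x ∈ s := by
  have hcards : s.toFinset.card = s.length := List.toFinset_card_of_nodup hnd
  have hcardu : (univ g start).toFinset.card = (univ g start).length :=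
    List.toFinset_card_of_nodup (univ_nodup g start)
  have hss : s.toFinset ⊆ (univ g start).toFinset := fun x hx => by
    simpa using hsub x (by simpa using hx)
  have : s.toFinset = (univ g start).toFinset :=
    Finset.eq_of_subset_of_card_le hss (by omega)
  intro x hx
  have : x ∈ s.toFinset := this ▸ (by simpa using hx)
  simpa using this

-- ---- A side ----

-- pass invariants: grows, sound, nodup, stays inside univ
theorem passA_inv (g : List (String × List String)) (start : String) :
    ∀ (l : List (String × List String)) (s : List String) (b : Bool),
      (∀ p ∈ l, p ∈ g) →
      s.Nodup → (∀ x ∈ s, Reach g start x) → (∀ x ∈ s, x ∈ univ g start) →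
      (∀ x ∈ s, x ∈ (l.foldl stepA (s, b)).1) ∧
      (l.foldl stepA (s, b)).1.Nodup ∧
      (∀ x ∈ (l.foldl stepA (s, b)).1, Reach g start x) ∧
      (∀ x ∈ (l.foldl stepA (s, b)).1, x ∈ univ g start) ∧
      s.length ≤ (l.foldl stepA (s, b)).1.length ∧
      ((l.foldl stepA (s, b)).2 = true → b = true ∨ s.length < (l.foldl stepA (s, b)).1.length) := by
  intro l
  induction l with
  | nil =>
    intro s b _ h1 h2 h3
    exact ⟨fun x h => h, h1, h2, h3, le_refl _, fun hb => Or.inl hb⟩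
  | cons p t ih =>
    intro s b hl h1 h2 h3
    have hp : p ∈ g := hl p (by simp)
    have ht : ∀ q ∈ t, q ∈ g := fun q hq => hl q (by simp [hq])
    by_cases hc : (!(PySem.Set.contains s p.1) && !(PySem.Set.inter (PySem.Set.ofList p.2) s).isEmpty) = true
    · have hstep : stepA (s, b) p = (PySem.Set.add s p.1, true) := by
        simp only [stepA]; rw [if_pos hc]
      have hnm : p.1 ∉ s := by
        intro hmem
        have := (Bool.and_eq_true _ _).mp hc |>.1
        rw [(PySem.Set.contains_iff s p.1).mpr hmem] at this
        simp at this
      have hne : PySem.Set.inter (PySem.Set.ofList p.2) s ≠ [] := by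
        have := (Bool.and_eq_true _ _).mp hc |>.2
        simp only [Bool.not_eq_true'] at this
        intro hnil; simp [hnil] at this
      obtain ⟨dd, hdd⟩ := List.exists_mem_of_ne_nil _ hne
      have hdd2 := (PySem.Set.mem_inter _ _ _).mp hdd
      have hreach : Reach g start p.1 :=
        Reach.step p dd hp ((PySem.Set.mem_ofList _ _).mp hdd2.1) (h2 dd hdd2.2)
      have hadd : PySem.Set.add s p.1 = s ++ [p.1] := PySem.Set.add_of_not_mem hnm
      have h1' : (PySem.Set.add s p.1).Nodup := PySem.Set.nodup_add _ _ h1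
      have h2' : ∀ x ∈ PySem.Set.add s p.1, Reach g start x := by
        intro x hx
        rcases (PySem.Set.mem_add _ _ _).mp hx with hx | hx
        · exact h2 x hx
        · exact hx ▸ hreach
      have h3' : ∀ x ∈ PySem.Set.add s p.1, x ∈ univ g start := by
        intro x hx
        rcases (PySem.Set.mem_add _ _ _).mp hx with hx | hx
        · exact h3 x hx
        · subst hx
          exact (PySem.Set.mem_ofList _ _).mpr (by simp; exact Or.inr ⟨p.2, hp⟩)
      have hlen : s.length + 1 = (PySem.Set.add s p.1).length := by simp [hadd]
      obtain ⟨c1, c2, c3, c4, c5, _⟩ := ih (PySem.Set.add s p.1) true ht h1' h2' h3'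
      simp only [List.foldl_cons, hstep]
      refine ⟨?_, c2, c3, c4, by omega, fun _ => Or.inr (by omega)⟩
      intro x hx
      exact c1 x ((PySem.Set.mem_add _ _ _).mpr (Or.inl hx))
    · have hstep : stepA (s, b) p = (s, b) := by
        simp only [stepA]; rw [if_neg hc]
      simp only [List.foldl_cons, hstep]
      exact ih s b ht h1 h2 h3

-- a pass that reports changed=True once keeps the flag set
theorem passA_flag_mono (l : List (String × List String)) :
    ∀ s : List String, (l.foldl stepA (s, true)).2 = true := by
  induction l with
  | nil => intro s; rfl
  | cons p t ih =>
    intro s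
    by_cases hc : (!(PySem.Set.contains s p.1) && !(PySem.Set.inter (PySem.Set.ofList p.2) s).isEmpty) = true
    · simp only [List.foldl_cons, stepA, if_pos hc]; exact ih _
    · simp only [List.foldl_cons, stepA, if_neg hc]; exact ih _

-- unchanged pass: the set is returned as-is and is closed
theorem passA_closed :
    ∀ (l : List (String × List String)) (s : List String),
      (l.foldl stepA (s, false)).2 = false →
      (l.foldl stepA (s, false)).1 = s ∧
      (∀ p ∈ l, (∃ d ∈ p.2, d ∈ s) → p.1 ∈ s) := by
  intro l
  induction l with
  | nil => intro s _; exact ⟨rfl, by simp⟩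
  | cons p t ih =>
    intro s hfl
    by_cases hc : (!(PySem.Set.contains s p.1) && !(PySem.Set.inter (PySem.Set.ofList p.2) s).isEmpty) = true
    · exfalso
      simp only [List.foldl_cons, stepA, if_pos hc] at hfl
      rw [passA_flag_mono] at hfl
      exact absurd hfl (by simp)
    · simp only [List.foldl_cons, stepA, if_neg hc] at hfl ⊢
      obtain ⟨e1, e2⟩ := ih s hfl
      refine ⟨e1, ?_⟩
      intro q hq hex
      rcases List.mem_cons.mp hq with hq | hq
      · subst hq
        obtain ⟨d, hd1, hd2⟩ := hex
        have hmem : d ∈ PySem.Set.inter (PySem.Set.ofList q.2) s :=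
          (PySem.Set.mem_inter _ _ _).mpr ⟨(PySem.Set.mem_ofList _ _).mpr hd1, hd2⟩
        have hni : (PySem.Set.inter (PySem.Set.ofList q.2) s).isEmpty = false := by
          rcases h : PySem.Set.inter (PySem.Set.ofList q.2) s with _ | _
          · rw [h] at hmem; simp at hmem
          · simp
        by_cases hcont : PySem.Set.contains s q.1 = true
        · exact (PySem.Set.contains_iff _ _).mp hcont
        · exfalso
          apply hc
          have hcf : PySem.Set.contains s q.1 = false := by simpa using hcont
          rw [hcf, hni]
          rfl
      · exact e2 q hq hex

theorem loopA_good (g : List (String × List String)) (start : String) :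
    ∀ (n : Nat) (s : List String),
      s.Nodup → start ∈ s → (∀ x ∈ s, Reach g start x) → (∀ x ∈ s, x ∈ univ g start) →
      (univ g start).length ≤ s.length + n →
      (∀ x ∈ s, x ∈ loopA g n s) ∧
      (loopA g n s).Nodup ∧
      start ∈ loopA g n s ∧
      (∀ x ∈ loopA g n s, Reach g start x) ∧
      (∀ p ∈ g, (∃ d ∈ p.2, d ∈ loopA g n s) → p.1 ∈ loopA g n s) := by
  intro n
  induction n with
  | zero =>
    intro s h1 h0 h2 h3 hfuel
    have hfull := mem_of_full h1 h3 (by omega)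
    simp only [loopA]
    refine ⟨fun x h => h, h1, h0, h2, ?_⟩
    intro p hp _
    exact hfull p.1 ((PySem.Set.mem_ofList _ _).mpr (by simp; exact Or.inr ⟨p.2, hp⟩))
  | succ n ih =>
    intro s h1 h0 h2 h3 hfuel
    obtain ⟨c1, c2, c3, c4, c5, c6⟩ := passA_inv g start g s false (fun _ h => h) h1 h2 h3
    rcases hfl : (g.foldl stepA (s, false)).2 with _ | _
    · have hred : loopA g (n + 1) s = (g.foldl stepA (s, false)).1 := by
        simp only [loopA, hfl]; simp
      obtain ⟨e1, e2⟩ := passA_closed g s hfl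
      rw [hred, e1]
      exact ⟨fun x h => h, h1, h0, h2, fun p hp hex => e2 p hp hex⟩
    · have hred : loopA g (n + 1) s = loopA g n (g.foldl stepA (s, false)).1 := by
        simp only [loopA, hfl]; simp
      rw [hred]
      have hstrict : s.length < (g.foldl stepA (s, false)).1.length := by
        rcases c6 hfl with h | h
        · exact absurd h (by simp)
        · exact h
      obtain ⟨d1, d2, d3, d4, d5⟩ := ih (g.foldl stepA (s, false)).1 c2 (c1 start h0) c3 c4 (by omega)
      exact ⟨fun x hx => d1 x (c1 x hx), d2, d3, d4, d5⟩

theorem loopA_char (g : List (String × List String)) (start : String) :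
    (loopA g (g.length + 1) (PySem.Set.add PySem.Set.empty start)).Nodup ∧
    (∀ x, x ∈ loopA g (g.length + 1) (PySem.Set.add PySem.Set.empty start) ↔ Reach g start x) := by
  have hs0 : PySem.Set.add PySem.Set.empty start = [start] := by
    rw [show (PySem.Set.empty : PySem.Set String) = ([] : List String) from rfl,
      PySem.Set.add_of_not_mem (List.not_mem_nil)]
    rfl
  rw [hs0]
  have hfuel : (univ g start).length ≤ [start].length + (g.length + 1) := by
    have := PySem.Set.length_ofList_le (start :: g.map Prod.fst)
    simp only [univ] at *
    simp at this ⊢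
    omega
  obtain ⟨c1, c2, c3, c4, c5⟩ := loopA_good g start (g.length + 1) [start]
    (by simp) (by simp)
    (by intro x hx; simp at hx; exact hx ▸ Reach.refl)
    (by intro x hx; simp at hx; subst hx
        exact (PySem.Set.mem_ofList _ _).mpr (by simp))
    hfuel
  refine ⟨c2, fun x => ⟨c4 x, fun hr => ?_⟩⟩
  induction hr with
  | refl => exact c1 start (by simp)
  | step p d hp hd _ ihr => exact c5 p hp ⟨d, hd, ihr⟩

-- ---- B side ----

theorem mem_revDict (g : List (String × List String)) (d name : String) :
    name ∈ (revDict g).getD d [] ↔ ∃ p ∈ g, p.1 = name ∧ d ∈ p.2 := by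
  unfold revDict revEdges
  rw [PySem.Dict.getD_foldl_modify_append]
  have key : ∀ (l : List (String × String)),
      (name ∈ (l.filter (fun p => p.1 == d)).map (·.2)) ↔ (d, name) ∈ l := by
    intro l
    induction l with
    | nil => simp
    | cons q t ih =>
      rcases q with ⟨q1, q2⟩
      by_cases hq : q1 = d
      · subst hq
        simp [ih, eq_comm]
      · simp [hq, ih, Ne.symm hq]
  rw [PySem.Dict.getD_empty, List.nil_append, key]
  simp only [List.mem_flatMap, List.mem_map, PySem.Set.mem_ofList, Prod.ext_iff]
  constructor
  · rintro ⟨p, hp, x, hx, hxd, hpn⟩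
    exact ⟨p, hp, hpn, hxd ▸ hx⟩
  · rintro ⟨p, hp, h1, h2⟩
    exact ⟨p, hp, d, h2, rfl, h1⟩

-- one expansion step: fold over the neighbours ns of a popped node, state (visited, queue)
theorem bfs_fold_inv (ns : List String) :
    ∀ (v t : List String), v.Nodup → (∀ x ∈ t, x ∈ v) →
      (∀ x ∈ v, x ∈ (ns.foldl
        (fun (acc : PySem.Set String × List String) nxt =>
          if PySem.Set.contains acc.1 nxt then acc else (PySem.Set.add acc.1 nxt, acc.2 ++ [nxt]))
        (v, t)).1) ∧
      (∀ x ∈ ns, x ∈ (ns.foldl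
        (fun (acc : PySem.Set String × List String) nxt =>
          if PySem.Set.contains acc.1 nxt then acc else (PySem.Set.add acc.1 nxt, acc.2 ++ [nxt]))
        (v, t)).1) ∧
      (ns.foldl
        (fun (acc : PySem.Set String × List String) nxt =>
          if PySem.Set.contains acc.1 nxt then acc else (PySem.Set.add acc.1 nxt, acc.2 ++ [nxt]))
        (v, t)).1.Nodup ∧
      (∀ x ∈ (ns.foldl
        (fun (acc : PySem.Set String × List String) nxt =>
          if PySem.Set.contains acc.1 nxt then acc else (PySem.Set.add acc.1 nxt, acc.2 ++ [nxt]))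
        (v, t)).1, x ∈ v ∨ x ∈ ns) ∧
      (∀ x ∈ (ns.foldl
        (fun (acc : PySem.Set String × List String) nxt =>
          if PySem.Set.contains acc.1 nxt then acc else (PySem.Set.add acc.1 nxt, acc.2 ++ [nxt]))
        (v, t)).2, x ∈ (ns.foldl
        (fun (acc : PySem.Set String × List String) nxt =>
          if PySem.Set.contains acc.1 nxt then acc else (PySem.Set.add acc.1 nxt, acc.2 ++ [nxt]))
        (v, t)).1) ∧
      (∀ x ∈ t, x ∈ (ns.foldl
        (fun (acc : PySem.Set String × List String) nxt =>
          if PySem.Set.contains acc.1 nxt then acc else (PySem.Set.add acc.1 nxt, acc.2 ++ [nxt]))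
        (v, t)).2) ∧
      (∀ x ∈ (ns.foldl
        (fun (acc : PySem.Set String × List String) nxt =>
          if PySem.Set.contains acc.1 nxt then acc else (PySem.Set.add acc.1 nxt, acc.2 ++ [nxt]))
        (v, t)).1, x ∈ v ∨ x ∈ (ns.foldl
        (fun (acc : PySem.Set String × List String) nxt =>
          if PySem.Set.contains acc.1 nxt then acc else (PySem.Set.add acc.1 nxt, acc.2 ++ [nxt]))
        (v, t)).2) ∧
      (ns.foldl
        (fun (acc : PySem.Set String × List String) nxt =>
          if PySem.Set.contains acc.1 nxt then acc else (PySem.Set.add acc.1 nxt, acc.2 ++ [nxt]))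
        (v, t)).1.length + t.length = v.length + (ns.foldl
        (fun (acc : PySem.Set String × List String) nxt =>
          if PySem.Set.contains acc.1 nxt then acc else (PySem.Set.add acc.1 nxt, acc.2 ++ [nxt]))
        (v, t)).2.length := by
  induction ns with
  | nil =>
    intro v t h1 htv
    simp only [List.foldl_nil]
    exact ⟨fun x h => h, by simp, h1, fun x hx => Or.inl hx, htv, fun x h => h,
      fun x hx => Or.inl hx, by simp⟩
  | cons nxt ns ih =>
    intro v t h1 htv
    by_cases hc : PySem.Set.contains v nxt = true
    · simp only [List.foldl_cons, if_pos hc]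
      obtain ⟨d1, d2, d3, d4, d5, d6, d7, d8⟩ := ih v t h1 htv
      refine ⟨d1, ?_, d3, ?_, d5, d6, d7, d8⟩
      · intro x hx
        rcases List.mem_cons.mp hx with hx | hx
        · exact hx ▸ d1 nxt ((PySem.Set.contains_iff _ _).mp hc)
        · exact d2 x hx
      · intro x hx
        rcases d4 x hx with h | h
        · exact Or.inl h
        · exact Or.inr (by simp [h])
    · simp only [List.foldl_cons, if_neg hc]
      have hnm : nxt ∉ v := fun hmem => hc ((PySem.Set.contains_iff _ _).mpr hmem)
      have h1' : (PySem.Set.add v nxt).Nodup := PySem.Set.nodup_add _ _ h1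
      have htv' : ∀ x ∈ t ++ [nxt], x ∈ PySem.Set.add v nxt := by
        intro x hx
        rcases List.mem_append.mp hx with hx | hx
        · exact (PySem.Set.mem_add _ _ _).mpr (Or.inl (htv x hx))
        · exact (PySem.Set.mem_add _ _ _).mpr (Or.inr (by simpa using hx))
      obtain ⟨d1, d2, d3, d4, d5, d6, d7, d8⟩ := ih (PySem.Set.add v nxt) (t ++ [nxt]) h1' htv'
      have hlv : (PySem.Set.add v nxt).length = v.length + 1 := by
        rw [PySem.Set.add_of_not_mem hnm]; simp
      refine ⟨?_, ?_, d3, ?_, d5, ?_, ?_, by simp only [List.length_append, List.length_cons, List.length_nil] at d8; omega⟩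
      · intro x hx
        exact d1 x ((PySem.Set.mem_add _ _ _).mpr (Or.inl hx))
      · intro x hx
        rcases List.mem_cons.mp hx with hx | hx
        · exact hx ▸ d1 nxt ((PySem.Set.mem_add _ _ _).mpr (Or.inr rfl))
        · exact d2 x hx
      · intro x hx
        rcases d4 x hx with h | h
        · rcases (PySem.Set.mem_add _ _ _).mp h with h | h
          · exact Or.inl h
          · exact Or.inr (by simp [h])
        · exact Or.inr (by simp [h])
      · intro x hx
        exact d6 x (by simp [hx])
      · intro x hx
        rcases d7 x hx with h | h
        · rcases (PySem.Set.mem_add _ _ _).mp h with h | h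
          · exact Or.inl h
          · exact Or.inr (d6 x (by simp [h]))
        · exact Or.inr h

theorem bfsB_good (g : List (String × List String)) (start : String) :
    ∀ (n : Nat) (q v : List String),
      v.Nodup → start ∈ v → (∀ x ∈ v, Reach g start x) → (∀ x ∈ v, x ∈ univ g start) →
      (∀ x ∈ q, x ∈ v) →
      (∀ x ∈ v, x ∉ q → ∀ name ∈ (revDict g).getD x [], name ∈ v) →
      (univ g start).length + q.length ≤ n + v.length →
      (∀ x ∈ v, x ∈ bfsB (revDict g) n q v) ∧
      (bfsB (revDict g) n q v).Nodup ∧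
      (∀ x ∈ bfsB (revDict g) n q v, Reach g start x) ∧
      (∀ x ∈ bfsB (revDict g) n q v, ∀ name ∈ (revDict g).getD x [], name ∈ bfsB (revDict g) n q v) := by
  intro n
  induction n with
  | zero =>
    intro q v h1 h0 h2 h3 hq hexp hfuel
    have hvle : v.length ≤ (univ g start).length := length_le_univ h1 h3
    have hq0 : q = [] := List.eq_nil_of_length_eq_zero (by omega)
    subst hq0
    exact ⟨fun x h => h, h1, h2, fun x hx name hname => hexp x hx (by simp) name hname⟩
  | succ n ih =>
    intro q v h1 h0 h2 h3 hq hexp hfuel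
    cases q with
    | nil =>
      simp only [bfsB]
      exact ⟨fun x h => h, h1, h2, fun x hx name hname => hexp x hx (by simp) name hname⟩
    | cons cur rest =>
      have hcv : cur ∈ v := hq cur (by simp)
      have hrv : ∀ x ∈ rest, x ∈ v := fun x hx => hq x (by simp [hx])
      obtain ⟨c1, c2, c3, c4, c5, c6, c7, c8⟩ :=
        bfs_fold_inv ((revDict g).getD cur []) v rest h1 hrv
      set r := (((revDict g).getD cur []).foldl
        (fun (acc : PySem.Set String × List String) nxt =>
          if PySem.Set.contains acc.1 nxt then acc else (PySem.Set.add acc.1 nxt, acc.2 ++ [nxt]))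
        (v, rest)) with hr
      have hred : bfsB (revDict g) (n + 1) (cur :: rest) v = bfsB (revDict g) n r.2 r.1 := by
        simp only [bfsB]
        rw [hr]
      have h2' : ∀ x ∈ r.1, Reach g start x := by
        intro x hx
        rcases c4 x hx with h | h
        · exact h2 x h
        · obtain ⟨p, hp, hpn, hd⟩ := (mem_revDict g cur x).mp h
          exact hpn ▸ Reach.step p cur hp hd (h2 cur hcv)
      have h3' : ∀ x ∈ r.1, x ∈ univ g start := by
        intro x hx
        rcases c4 x hx with h | h
        · exact h3 x h
        · obtain ⟨p, hp, hpn, _⟩ := (mem_revDict g cur x).mp h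
          exact (PySem.Set.mem_ofList _ _).mpr (by simp; exact Or.inr ⟨p.2, hpn ▸ hp⟩)
      have hexp' : ∀ x ∈ r.1, x ∉ r.2 → ∀ name ∈ (revDict g).getD x [], name ∈ r.1 := by
        intro x hx hnx name hname
        have hxv : x ∈ v := by
          rcases c7 x hx with h | h
          · exact h
          · exact absurd h hnx
        by_cases hxc : x = cur
        · exact c2 name (hxc ▸ hname)
        · have hxr : x ∉ rest := fun hmem => hnx (c6 x hmem)
          have : x ∉ cur :: rest := by simp [hxc, hxr]
          exact c1 name (hexp x hxv this name hname)
      have hfuel' : (univ g start).length + r.2.length ≤ n + r.1.length := by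
        simp only [List.length_cons] at hfuel
        omega
      obtain ⟨d1, d2, d3, d4⟩ := ih r.2 r.1 c3 (c1 start h0) h2' h3' c5 hexp' hfuel'
      rw [hred]
      exact ⟨fun x hx => d1 x (c1 x hx), d2, d3, d4⟩

theorem bfsB_char (g : List (String × List String)) (start : String) :
    (bfsB (revDict g) (g.length + 1) [start] (PySem.Set.add PySem.Set.empty start)).Nodup ∧
    (∀ x, x ∈ bfsB (revDict g) (g.length + 1) [start] (PySem.Set.add PySem.Set.empty start) ↔ Reach g start x) := by
  have hs0 : PySem.Set.add PySem.Set.empty start = [start] := by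
    rw [show (PySem.Set.empty : PySem.Set String) = ([] : List String) from rfl,
      PySem.Set.add_of_not_mem (List.not_mem_nil)]
    rfl
  rw [hs0]
  have hfuel : (univ g start).length + [start].length ≤ (g.length + 1) + [start].length := by
    have := PySem.Set.length_ofList_le (start :: g.map Prod.fst)
    simp only [univ] at *
    simp at this ⊢
    omega
  obtain ⟨c1, c2, c3, c4⟩ := bfsB_good g start (g.length + 1) [start] [start]
    (by simp) (by simp)
    (by intro x hx; simp at hx; exact hx ▸ Reach.refl)
    (by intro x hx; simp at hx; subst hx
        exact (PySem.Set.mem_ofList _ _).mpr (by simp))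
    (fun x hx => hx)
    (by intro x hx hnx; simp at hx; exact absurd (by simp [hx]) hnx)
    hfuel
  refine ⟨c2, fun x => ⟨c3 x, fun hr => ?_⟩⟩
  induction hr with
  | refl => exact c1 start (by simp)
  | step p d hp hd _ ihr =>
    exact c4 d ihr p.1 ((mem_revDict g d p.1).mpr ⟨p, hp, rfl, hd⟩)

-- ===== VERDICT (by name: the statement is the Claim_ definition above) =====
theorem find_stages_from_py_spec : Claim_equal_find_stages_from_py := by
  intro start g _
  unfold Spec_find_stages_from_py find_stages_from_py find_stages_from_py_alt
  obtain ⟨hand, hamem⟩ := loopA_char g start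
  obtain ⟨hbnd, hbmem⟩ := bfsB_char g start
  exact PySem.List.sorted_eq_sorted_of_perm _ _ _ (fun a b h => h)
    ((List.perm_ext_iff_of_nodup hand hbnd).2 (fun x => (hamem x).trans (hbmem x).symm))
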